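-- pv_equiv track=rewrite | github.com/dcreply4u/2025-AI-TUNER-AGENTV3 | ui/console_log_viewer.py | _format_log_content
-- ===== SOURCE A (Python) =====
-- def _format_log_content(content: str) -> str:
--     """Format log content with HTML highlighting."""
--     # Escape HTML
--     import html
--     content = html.escape(content)
--
--     # Highlight error patterns
--     lines = content.split('\n')
--     formatted_lines = []
--
--     for line in lines:
--         formatted_line = line
--
--         # Highlight ERROR lines
--         if '[ERROR]' in line or 'ERROR:' in line or 'Error:' in line:
--             formatted_line = f'<span style="color: #e74c3c; font-weight: bold;">{line}</span>'
--         # Highlight WARNING lines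
--         elif '[WARN]' in line or 'WARNING:' in line or 'Warning:' in line:
--             formatted_line = f'<span style="color: #f39c12;">{line}</span>'
--         # Highlight INFO lines
--         elif '[INFO]' in line or '[OK]' in line:
--             formatted_line = f'<span style="color: #2ecc71;">{line}</span>'
--         # Highlight DEBUG lines
--         elif '[DEBUG]' in line:
--             formatted_line = f'<span style="color: #3498db;">{line}</span>'
--         # Highlight traceback
--         elif 'Traceback' in line or 'File "' in line or 'line ' in line:
--             formatted_line = f'<span style="color: #e67e22;">{line}</span>'
--         else:
--             formatted_line = f'<span style="color: #ecf0f1;">{line}</span>'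
--
--         formatted_lines.append(formatted_line)
--
--     return '<pre style="margin: 0; font-family: Consolas, monospace;">' + '\n'.join(formatted_lines) + '</pre>'
-- ===== SOURCE B (Python) =====
-- # Single-pass state machine over the raw characters: escapes inline, flushes a
-- # span at each newline, and picks the style as the minimum rule rank matching
-- # at any position (equivalent to the first rule with any substring hit).
-- _PATTERNS = [
--     ('[ERROR]', 0), ('ERROR:', 0), ('Error:', 0),
--     ('[WARN]', 1), ('WARNING:', 1), ('Warning:', 1),
--     ('[INFO]', 2), ('[OK]', 2),
--     ('[DEBUG]', 3),
--     ('Traceback', 4), ('File "', 4), ('line ', 4),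
-- ]
-- _STYLES = ['#e74c3c; font-weight: bold;', '#f39c12;', '#2ecc71;',
--            '#3498db;', '#e67e22;', '#ecf0f1;']
-- _ESC = {'&': '&amp;', '<': '&lt;', '>': '&gt;', '"': '&quot;', "'": '&#x27;'}
--
--
-- def _format_log_content(content: str) -> str:
--     out = ['<pre style="margin: 0; font-family: Consolas, monospace;">']
--     line = []
--
--     def flush():
--         s = ''.join(line)
--         best = 5
--         for i in range(len(s)):
--             for pat, rank in _PATTERNS:
--                 if rank < best and s.startswith(pat, i):
--                     best = rank
--         out.append(f'<span style="color: {_STYLES[best]}">{s}</span>')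
--         line.clear()
--
--     for ch in content:
--         if ch == '\n':
--             flush()
--             out.append('\n')
--         else:
--             line.append(_ESC.get(ch, ch))
--     flush()
--     out.append('</pre>')
--     return ''.join(out)
-- ===== Notes on version B (the rewrite author's own statement) =====
-- stated objective: alternative
-- what changed: Replaces A's staged pipeline (escape everything via a chain of replace calls, split into lines, pick each line's span through an if/elif substring chain, then join) with a single pass over the characters: a state machine that escapes each character inline, flushes a styled span at each newline, and selects the style as the minimal rule rank matching at any start position.
import Mathlib
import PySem

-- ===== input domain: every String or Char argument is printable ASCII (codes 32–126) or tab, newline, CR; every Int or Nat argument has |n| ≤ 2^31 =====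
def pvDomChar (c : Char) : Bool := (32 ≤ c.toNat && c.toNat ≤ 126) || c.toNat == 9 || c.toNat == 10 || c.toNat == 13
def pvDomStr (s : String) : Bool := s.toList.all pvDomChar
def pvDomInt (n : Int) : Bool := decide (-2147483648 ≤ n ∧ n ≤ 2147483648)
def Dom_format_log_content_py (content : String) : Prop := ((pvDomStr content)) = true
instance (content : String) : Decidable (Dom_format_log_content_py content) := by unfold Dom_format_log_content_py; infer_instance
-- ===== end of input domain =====

-- B is a single-pass character state machine (inline escaping, span flushed at each
-- newline, style = minimal rule rank matching at any position) instead of A's staged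
-- replace-chain escape + split + per-line if/elif substring chain + join (alternative).

-- ===== PORT A =====
-- html.escape(s) with quote=True: the exact CPython replace chain (exact on ASCII input)
def pyHtmlEscape (s : String) : String :=
  PySem.Str.replace
    (PySem.Str.replace
      (PySem.Str.replace
        (PySem.Str.replace
          (PySem.Str.replace s "&" "&amp;")
          "<" "&lt;")
        ">" "&gt;")
      "\"" "&quot;")
    "'" "&#x27;"

def pvFmtLineA (line : String) : String :=
  if PySem.Str.isIn "[ERROR]" line || PySem.Str.isIn "ERROR:" line || PySem.Str.isIn "Error:" line then
    "<span style=\"color: #e74c3c; font-weight: bold;\">" ++ line ++ "</span>"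
  else if PySem.Str.isIn "[WARN]" line || PySem.Str.isIn "WARNING:" line || PySem.Str.isIn "Warning:" line then
    "<span style=\"color: #f39c12;\">" ++ line ++ "</span>"
  else if PySem.Str.isIn "[INFO]" line || PySem.Str.isIn "[OK]" line then
    "<span style=\"color: #2ecc71;\">" ++ line ++ "</span>"
  else if PySem.Str.isIn "[DEBUG]" line then
    "<span style=\"color: #3498db;\">" ++ line ++ "</span>"
  else if PySem.Str.isIn "Traceback" line || PySem.Str.isIn "File \"" line || PySem.Str.isIn "line " line then
    "<span style=\"color: #e67e22;\">" ++ line ++ "</span>"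
  else
    "<span style=\"color: #ecf0f1;\">" ++ line ++ "</span>"

def format_log_content_py (content : String) : String :=
  let c := pyHtmlEscape content
  let lines := (PySem.Str.split? c "\n").getD []  -- sep is the nonempty literal "\n", so split? is some
  let formatted := lines.foldl (fun acc line => acc ++ [pvFmtLineA line]) []
  "<pre style=\"margin: 0; font-family: Consolas, monospace;\">" ++ PySem.Str.join "\n" formatted ++ "</pre>"

-- ===== PORT B =====
-- _PATTERNS: (pattern, rank of its rule)
def pvPatterns : List (List Char × Nat) :=
  [("[ERROR]".toList, 0), ("ERROR:".toList, 0), ("Error:".toList, 0),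
   ("[WARN]".toList, 1), ("WARNING:".toList, 1), ("Warning:".toList, 1),
   ("[INFO]".toList, 2), ("[OK]".toList, 2),
   ("[DEBUG]".toList, 3),
   ("Traceback".toList, 4), ("File \"".toList, 4), ("line ".toList, 4)]

-- _STYLES
def pvStyles : List String :=
  ["#e74c3c; font-weight: bold;", "#f39c12;", "#2ecc71;", "#3498db;", "#e67e22;", "#ecf0f1;"]

-- _ESC.get(ch, ch)
def pvEscChar (c : Char) : List Char :=
  if c = '&' then "&amp;".toList
  else if c = '<' then "&lt;".toList
  else if c = '>' then "&gt;".toList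
  else if c = '"' then "&quot;".toList
  else if c = '\'' then "&#x27;".toList
  else [c]

-- inner loop of flush(): over the patterns, keep the minimal matching rank
def pvScanPats (s : List Char) : Nat → List (List Char × Nat) → Nat
  | best, [] => best
  | best, (p, r) :: rest =>
      pvScanPats s (if decide (r < best) && PySem.Chars.startswith s p then r else best) rest

-- outer loop of flush(): over all start positions i (= suffixes of s)
def pvScanPos : List Char → Nat → Nat
  | [], best => best
  | s@(_ :: t), best => pvScanPos t (pvScanPats s best pvPatterns)

-- flush(): emit the span for the accumulated (escaped) line
def pvFlush (line : List Char) : String :=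
  "<span style=\"color: " ++ pvStyles.getD (pvScanPos line 5) "" ++ "\">" ++ String.ofList line ++ "</span>"

-- the main character loop; `line` is the accumulated escaped current line
def pvBGo : List Char → List Char → String
  | [], line => pvFlush line ++ "</pre>"
  | c :: rest, line =>
      if c = '\n' then pvFlush line ++ "\n" ++ pvBGo rest []
      else pvBGo rest (line ++ pvEscChar c)

def format_log_content_py_alt (content : String) : String :=
  "<pre style=\"margin: 0; font-family: Consolas, monospace;\">" ++ pvBGo content.toList []

-- ===== PRECONDITION & SPEC =====
def Spec_format_log_content_py (content : String) (out : String) : Prop := out = format_log_content_py_alt content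
instance (content : String) (out : String) : Decidable (Spec_format_log_content_py content out) := by unfold Spec_format_log_content_py; infer_instance

-- ===== CLAIM =====
def Claim_equal_format_log_content_py : Prop := ∀ (content : String), Dom_format_log_content_py content → Spec_format_log_content_py content (format_log_content_py content)

-- ===== LEMMAS AND PROOFS =====

-- single-character replace is a flatMap
theorem replace_go_single (a : Char) (new : List Char) :
    ∀ (fuel : Nat) (l acc : List Char), l.length ≤ fuel →
      PySem.Chars.replace.go [a] new fuel l acc =
        acc.reverse ++ l.flatMap (fun c => if c = a then new else [c]) := by
  intro fuel
  induction fuel with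
  | zero =>
    intro l acc h
    have : l = [] := List.eq_nil_of_length_eq_zero (Nat.le_zero.mp h)
    subst this; simp [PySem.Chars.replace.go]
  | succ n ih =>
    intro l acc h
    cases l with
    | nil => simp [PySem.Chars.replace.go]
    | cons c t =>
      have hstep : PySem.Chars.replace.go [a] new (n+1) (c::t) acc =
          if [a].isPrefixOf (c::t) then PySem.Chars.replace.go [a] new n (List.drop 1 (c::t)) (new.reverse ++ acc)
          else PySem.Chars.replace.go [a] new n t (c :: acc) := rfl
      rw [hstep]
      have ht : t.length ≤ n := by simpa using h
      by_cases hc : c = a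
      · subst hc
        simp only [List.isPrefixOf, BEq.rfl, Bool.true_and, if_true,
          List.drop_succ_cons, List.drop_zero]
        rw [ih t _ ht]
        simp [List.flatMap_cons]
      · have : ([a].isPrefixOf (c::t)) = false := by
          simp [List.isPrefixOf]
          exact fun h' => absurd h'.symm hc
        rw [this]
        simp only [if_false, Bool.false_eq_true]
        rw [ih t _ ht]
        simp [List.flatMap_cons, hc]

theorem replace_single (a : Char) (new l : List Char) :
    PySem.Chars.replace l [a] new = l.flatMap (fun c => if c = a then new else [c]) := by
  have h : PySem.Chars.replace l [a] new = PySem.Chars.replace.go [a] new l.length l [] := by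
    simp [PySem.Chars.replace]
  rw [h, replace_go_single a new l.length l [] (le_refl _)]
  simp

-- html.escape = per-character escaping
theorem escape_toList (s : String) :
    (pyHtmlEscape s).toList = s.toList.flatMap pvEscChar := by
  simp only [pyHtmlEscape, PySem.Str.toList_replace]
  have h1 : ("&" : String).toList = ['&'] := rfl
  have h2 : ("<" : String).toList = ['<'] := rfl
  have h3 : (">" : String).toList = ['>'] := rfl
  have h4 : ("\"" : String).toList = ['"'] := rfl
  have h5 : ("'" : String).toList = ['\''] := rfl
  rw [h1, h2, h3, h4, h5]
  rw [replace_single, replace_single, replace_single, replace_single, replace_single]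
  rw [List.flatMap_assoc, List.flatMap_assoc, List.flatMap_assoc, List.flatMap_assoc]
  congr 1
  funext c
  by_cases h1 : c = '&'
  · subst h1; decide
  by_cases h2 : c = '<'
  · subst h2; decide
  by_cases h3 : c = '>'
  · subst h3; decide
  by_cases h4 : c = '"'
  · subst h4; decide
  by_cases h5 : c = '\''
  · subst h5; decide
  simp [pvEscChar, h1, h2, h3, h4, h5]

-- lines of a char list, split on '\n'
def pvLinesOf : List Char → List (List Char)
  | [] => [[]]
  | c :: r => if c = '\n' then [] :: pvLinesOf r else (pvLinesOf r).modifyHead (c :: ·)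

theorem pvLinesOf_ne_nil (l : List Char) : pvLinesOf l ≠ [] := by
  cases l with
  | nil => simp [pvLinesOf]
  | cons c r =>
    simp only [pvLinesOf]
    split
    · simp
    · cases h : pvLinesOf r with
      | nil => exact absurd h (pvLinesOf_ne_nil r)
      | cons x xs => simp [List.modifyHead]

theorem splitOn_go_newline :
    ∀ (fuel : Nat) (l cur : List Char) (acc : List (List Char)), l.length < fuel →
      PySem.Chars.splitOn.go ['\n'] fuel l cur acc =
        acc.reverse ++ (pvLinesOf l).modifyHead (cur.reverse ++ ·) := by
  intro fuel
  induction fuel with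
  | zero => intro l cur acc h; omega
  | succ n ih =>
    intro l cur acc h
    cases l with
    | nil =>
      have hbase : PySem.Chars.splitOn.go ['\n'] (n+1) [] cur acc = (cur.reverse :: acc).reverse := rfl
      rw [hbase]
      simp [pvLinesOf, List.modifyHead]
    | cons c rest =>
      have hstep : PySem.Chars.splitOn.go ['\n'] (n+1) (c::rest) cur acc =
          if ['\n'].isPrefixOf (c::rest) then PySem.Chars.splitOn.go ['\n'] n (List.drop 1 (c::rest)) [] (cur.reverse :: acc)
          else PySem.Chars.splitOn.go ['\n'] n rest (c :: cur) acc := rfl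
      rw [hstep]
      have hr : rest.length < n := by simpa using h
      by_cases hc : c = '\n'
      · subst hc
        simp only [List.isPrefixOf, BEq.rfl, Bool.true_and, if_true,
          List.drop_succ_cons, List.drop_zero]
        rw [ih rest [] _ hr]
        simp only [pvLinesOf, if_true, List.reverse_cons, List.reverse_nil, List.nil_append,
          List.modifyHead, List.append_assoc]
        cases hres : pvLinesOf rest with
        | nil => exact absurd hres (pvLinesOf_ne_nil rest)
        | cons y ys => simp
      · have hpre : (['\n'].isPrefixOf (c::rest)) = false := by
          simp [List.isPrefixOf]
          exact fun h' => absurd h'.symm hc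
        rw [hpre]
        simp only [if_false, Bool.false_eq_true]
        rw [ih rest (c :: cur) acc hr]
        simp only [pvLinesOf, hc, if_false, List.reverse_cons]
        rw [List.modifyHead_modifyHead]
        have hfun : (fun x => cur.reverse ++ [c] ++ x) = ((fun x => cur.reverse ++ x) ∘ fun x => c :: x) := by
          funext x; simp
        rw [hfun]

theorem splitOn_newline (l : List Char) :
    PySem.Chars.splitOn l ['\n'] = pvLinesOf l := by
  have h : PySem.Chars.splitOn l ['\n'] = PySem.Chars.splitOn.go ['\n'] (l.length + 1) l [] [] := rfl
  rw [h, splitOn_go_newline (l.length + 1) l [] [] (by omega)]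
  simp only [List.reverse_nil, List.nil_append]
  cases pvLinesOf l with
  | nil => rfl
  | cons y ys => rfl

theorem pvLinesOf_append_no_nl (xs ys : List Char) (h : '\n' ∉ xs) :
    pvLinesOf (xs ++ ys) = (pvLinesOf ys).modifyHead (xs ++ ·) := by
  induction xs with
  | nil =>
    simp only [List.nil_append]
    cases pvLinesOf ys with
    | nil => rfl
    | cons y ys' => rfl
  | cons x xs ih =>
    have hx : x ≠ '\n' := fun hx => h (hx ▸ List.mem_cons_self)
    have hxs : '\n' ∉ xs := fun hm => h (List.mem_cons_of_mem _ hm)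
    simp only [List.cons_append, pvLinesOf, hx, if_false]
    rw [ih hxs, List.modifyHead_modifyHead]
    rfl

-- minimal set index: first of five flags, else 5
def pvMinIdx (b0 b1 b2 b3 b4 : Bool) : Nat :=
  if b0 then 0 else if b1 then 1 else if b2 then 2 else if b3 then 3 else if b4 then 4 else 5

-- min rank among patterns matching at position 0
def pvPosRank (s : List Char) : List (List Char × Nat) → Nat
  | [] => 5
  | (p, r) :: rest => if p.isPrefixOf s then min r (pvPosRank s rest) else pvPosRank s rest

theorem scanPats_eq (s : List Char) :
    ∀ (pats : List (List Char × Nat)) (best : Nat), best ≤ 5 →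
      pvScanPats s best pats = min best (pvPosRank s pats) := by
  intro pats
  induction pats with
  | nil => intro best h; simp [pvScanPats, pvPosRank, Nat.min_eq_left h]
  | cons pr rest ih =>
    rcases pr with ⟨p, r⟩
    intro best h
    simp only [pvScanPats, pvPosRank, PySem.Chars.startswith]
    by_cases hp : p.isPrefixOf s = true
    · simp only [hp, Bool.and_true, if_true]
      by_cases hr : r < best
      · simp only [hr, decide_true, if_true]
        rw [ih r (by omega)]
        omega
      · simp only [hr, decide_false, if_false, Bool.false_eq_true]
        rw [ih best h]
        omega
    · simp only [Bool.not_eq_true] at hp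
      simp only [hp, Bool.and_false, if_false, Bool.false_eq_true]
      rw [ih best h]

theorem minIdx_or (p0 p1 p2 p3 p4 q0 q1 q2 q3 q4 : Bool) :
    pvMinIdx (p0 || q0) (p1 || q1) (p2 || q2) (p3 || q3) (p4 || q4) =
      min (pvMinIdx p0 p1 p2 p3 p4) (pvMinIdx q0 q1 q2 q3 q4) := by
  revert p0 p1 p2 p3 p4 q0 q1 q2 q3 q4; decide

theorem pvPosRank_le_five (s : List Char) : ∀ pats, pvPosRank s pats ≤ 5 := by
  intro pats
  induction pats with
  | nil => simp [pvPosRank]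
  | cons pr rest ih => rcases pr with ⟨p, r⟩; simp only [pvPosRank]; split <;> omega

theorem posRank_append (s : List Char) (l1 l2 : List (List Char × Nat)) :
    pvPosRank s (l1 ++ l2) = min (pvPosRank s l1) (pvPosRank s l2) := by
  induction l1 with
  | nil =>
    simp only [List.nil_append, pvPosRank]
    have := pvPosRank_le_five s l2
    omega
  | cons pr rest ih =>
    rcases pr with ⟨p, r⟩
    simp only [List.cons_append, pvPosRank]
    split <;> omega

theorem posRank_group3 (s p1 p2 p3 : List Char) (r : Nat) :
    pvPosRank s [(p1, r), (p2, r), (p3, r)] =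
      if p1.isPrefixOf s || p2.isPrefixOf s || p3.isPrefixOf s then min r 5 else 5 := by
  simp only [pvPosRank]
  split_ifs <;> simp_all

theorem posRank_group2 (s p1 p2 : List Char) (r : Nat) :
    pvPosRank s [(p1, r), (p2, r)] =
      if p1.isPrefixOf s || p2.isPrefixOf s then min r 5 else 5 := by
  simp only [pvPosRank]
  split_ifs <;> simp_all

theorem posRank_group1 (s p1 : List Char) (r : Nat) :
    pvPosRank s [(p1, r)] = if p1.isPrefixOf s then min r 5 else 5 := by
  simp [pvPosRank]

theorem minIdx_min_ite (b0 b1 b2 b3 b4 : Bool) :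
    min (if b0 then min (0:Nat) 5 else 5)
      (min (if b1 then min (1:Nat) 5 else 5)
        (min (if b2 then min (2:Nat) 5 else 5)
          (min (if b3 then min (3:Nat) 5 else 5) (if b4 then min (4:Nat) 5 else 5)))) =
      pvMinIdx b0 b1 b2 b3 b4 := by
  revert b0 b1 b2 b3 b4; decide

theorem posRank_eq (s : List Char) :
    pvPosRank s pvPatterns = pvMinIdx
      ("[ERROR]".toList.isPrefixOf s || "ERROR:".toList.isPrefixOf s || "Error:".toList.isPrefixOf s)
      ("[WARN]".toList.isPrefixOf s || "WARNING:".toList.isPrefixOf s || "Warning:".toList.isPrefixOf s)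
      ("[INFO]".toList.isPrefixOf s || "[OK]".toList.isPrefixOf s)
      ("[DEBUG]".toList.isPrefixOf s)
      ("Traceback".toList.isPrefixOf s || "File \"".toList.isPrefixOf s || "line ".toList.isPrefixOf s) := by
  have hsplitp : pvPatterns =
      [("[ERROR]".toList, 0), ("ERROR:".toList, 0), ("Error:".toList, 0)] ++
        ([("[WARN]".toList, 1), ("WARNING:".toList, 1), ("Warning:".toList, 1)] ++
          ([("[INFO]".toList, 2), ("[OK]".toList, 2)] ++
            ([("[DEBUG]".toList, 3)] ++
              [("Traceback".toList, 4), ("File \"".toList, 4), ("line ".toList, 4)]))) := rfl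
  rw [hsplitp, posRank_append, posRank_append, posRank_append, posRank_append,
    posRank_group3, posRank_group3, posRank_group2, posRank_group1, posRank_group3,
    minIdx_min_ite]

-- line rank: min pvPosRank over all suffixes
def pvLineRank : List Char → Nat
  | [] => 5
  | s@(_ :: t) => min (pvPosRank s pvPatterns) (pvLineRank t)

theorem scanPos_eq :
    ∀ (s : List Char) (best : Nat), best ≤ 5 →
      pvScanPos s best = min best (pvLineRank s) := by
  intro s
  induction s with
  | nil => intro best h; simp [pvScanPos, pvLineRank, Nat.min_eq_left h]
  | cons c t ih =>
    intro best h
    simp only [pvScanPos, pvLineRank]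
    rw [scanPats_eq (c :: t) pvPatterns best h]
    rw [ih _ (by have := pvPosRank_le_five (c :: t) pvPatterns; omega)]
    omega

theorem pvLineRank_le_five (s : List Char) : pvLineRank s ≤ 5 := by
  induction s with
  | nil => simp [pvLineRank]
  | cons c t ih =>
    have hcons : pvLineRank (c :: t) = min (pvPosRank (c :: t) pvPatterns) (pvLineRank t) := rfl
    rw [hcons]; omega

theorem pvIsIn_cons (p : List Char) (c : Char) (t : List Char) :
    PySem.Chars.isIn p (c :: t) = (p.isPrefixOf (c :: t) || PySem.Chars.isIn p t) := by
  by_cases h : p <:+: (c :: t)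
  · rw [(PySem.Chars.isIn_iff_infix p (c :: t)).mpr h]
    rcases List.infix_cons_iff.mp h with hp | hs
    · rw [List.isPrefixOf_iff_prefix.mpr hp]; simp
    · rw [(PySem.Chars.isIn_iff_infix p t).mpr hs]; simp
  · rw [(PySem.Chars.isIn_eq_false_iff _ _).mpr h]
    have h1 : p.isPrefixOf (c :: t) = false := by
      cases hb : p.isPrefixOf (c :: t) with
      | false => rfl
      | true => exact absurd (List.infix_cons_iff.mpr (Or.inl (List.isPrefixOf_iff_prefix.mp hb))) h
    have h2 : PySem.Chars.isIn p t = false := by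
      rw [PySem.Chars.isIn_eq_false_iff _ _]
      intro hs
      exact h (List.infix_cons_iff.mpr (Or.inr hs))
    rw [h1, h2]; rfl

theorem or_shuffle3L (a1 b1 a2 b2 a3 b3 : Bool) :
    ((a1 || b1) || (a2 || b2) || (a3 || b3)) = ((a1 || a2 || a3) || (b1 || b2 || b3)) := by
  revert a1 b1 a2 b2 a3 b3; decide

theorem or_shuffle2L (a1 b1 a2 b2 : Bool) :
    ((a1 || b1) || (a2 || b2)) = ((a1 || a2) || (b1 || b2)) := by
  revert a1 b1 a2 b2; decide

theorem lineRank_eq (s : List Char) :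
    pvLineRank s = pvMinIdx
      (PySem.Chars.isIn "[ERROR]".toList s || PySem.Chars.isIn "ERROR:".toList s || PySem.Chars.isIn "Error:".toList s)
      (PySem.Chars.isIn "[WARN]".toList s || PySem.Chars.isIn "WARNING:".toList s || PySem.Chars.isIn "Warning:".toList s)
      (PySem.Chars.isIn "[INFO]".toList s || PySem.Chars.isIn "[OK]".toList s)
      (PySem.Chars.isIn "[DEBUG]".toList s)
      (PySem.Chars.isIn "Traceback".toList s || PySem.Chars.isIn "File \"".toList s || PySem.Chars.isIn "line ".toList s) := by
  induction s with
  | nil => decide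
  | cons c t ih =>
    have hcons : pvLineRank (c :: t) = min (pvPosRank (c :: t) pvPatterns) (pvLineRank t) := rfl
    rw [hcons, ih, posRank_eq (c :: t), ← minIdx_or]
    congr 1
    · simp only [pvIsIn_cons]
      exact (or_shuffle3L _ _ _ _ _ _).symm
    · simp only [pvIsIn_cons]
      exact (or_shuffle3L _ _ _ _ _ _).symm
    · simp only [pvIsIn_cons]
      exact (or_shuffle2L _ _ _ _).symm
    · simp only [pvIsIn_cons]
    · simp only [pvIsIn_cons]
      exact (or_shuffle3L _ _ _ _ _ _).symm

theorem fmt_eq (line : String) :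
    pvFmtLineA line = pvFlush line.toList := by
  unfold pvFmtLineA pvFlush
  rw [scanPos_eq line.toList 5 (by omega), Nat.min_eq_right (pvLineRank_le_five line.toList),
    lineRank_eq]
  simp only [PySem.Str.isIn_eq, String.ofList_toList]
  split_ifs with h0 h1 h2 h3 h4 <;> simp only [Bool.not_eq_true] at *
  · simp only [pvMinIdx, h0, if_true]; rfl
  · simp only [pvMinIdx, h0, h1, Bool.false_eq_true, if_false, if_true]; rfl
  · simp only [pvMinIdx, h0, h1, h2, Bool.false_eq_true, if_false, if_true]; rfl
  · simp only [pvMinIdx, h0, h1, h2, h3, Bool.false_eq_true, if_false, if_true]; rfl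
  · simp only [pvMinIdx, h0, h1, h2, h3, h4, Bool.false_eq_true, if_false, if_true]; rfl
  · simp only [pvMinIdx, h0, h1, h2, h3, h4, Bool.false_eq_true, if_false]; rfl

theorem escChar_no_nl (c : Char) (hc : c ≠ '\n') : '\n' ∉ pvEscChar c := by
  unfold pvEscChar
  split_ifs
  · decide
  · decide
  · decide
  · decide
  · decide
  · intro hm
    exact hc (List.mem_singleton.mp hm).symm

theorem bgo_toList :
    ∀ (cs line : List Char),
      (pvBGo cs line).toList =
        PySem.Chars.join ['\n']
          (((pvLinesOf (cs.flatMap pvEscChar)).modifyHead (line ++ ·)).map (fun l => (pvFlush l).toList))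
          ++ "</pre>".toList := by
  intro cs
  induction cs with
  | nil =>
    intro line
    simp only [pvBGo, List.flatMap_nil, pvLinesOf, List.modifyHead, List.map, String.toList_append,
      List.append_nil]
    rw [PySem.Chars.join_singleton]
  | cons c rest ih =>
    intro line
    by_cases hc : c = '\n'
    · subst hc
      have hesc : pvEscChar '\n' = ['\n'] := rfl
      have hstep : pvBGo ('\n' :: rest) line = pvFlush line ++ "\n" ++ pvBGo rest [] := by
        simp [pvBGo]
      rw [hstep]
      simp only [List.flatMap_cons, hesc, List.singleton_append, pvLinesOf, if_true,
        List.modifyHead, List.map, String.toList_append, List.append_nil]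
      cases hL : pvLinesOf (rest.flatMap pvEscChar) with
      | nil => exact absurd hL (pvLinesOf_ne_nil _)
      | cons y ys =>
        rw [List.map_cons, PySem.Chars.join_cons_cons]
        have hihr := ih []
        rw [hL] at hihr
        simp only [List.modifyHead, List.nil_append] at hihr
        rw [hihr]
        have hnl : ("\n" : String).toList = ['\n'] := rfl
        rw [hnl]
        simp [List.append_assoc]
    · have hstep : pvBGo (c :: rest) line = pvBGo rest (line ++ pvEscChar c) := by
        simp [pvBGo, hc]
      rw [hstep, ih (line ++ pvEscChar c)]
      simp only [List.flatMap_cons]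
      rw [pvLinesOf_append_no_nl (pvEscChar c) (rest.flatMap pvEscChar) (escChar_no_nl c hc)]
      rw [List.modifyHead_modifyHead]
      have hfun : ((fun x => line ++ x) ∘ fun x => pvEscChar c ++ x) =
          (fun x => (line ++ pvEscChar c) ++ x) := by
        funext x; simp
      rw [hfun]

-- ===== VERDICT =====
theorem format_log_content_py_spec : Claim_equal_format_log_content_py := by
  intro content _
  unfold Spec_format_log_content_py
  apply String.toList_inj.mp
  have hnl : ("\n" : String).toList = ['\n'] := rfl
  -- A side
  obtain ⟨L, hL⟩ : ∃ L, PySem.Str.split? (pyHtmlEscape content) "\n" = some L := by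
    cases hsp : PySem.Str.split? (pyHtmlEscape content) "\n" with
    | some L => exact ⟨L, rfl⟩
    | none =>
      have hm := PySem.Str.split?_map (pyHtmlEscape content) "\n"
      rw [hsp, hnl] at hm
      simp [PySem.Chars.split?] at hm
  have hmap : L.map String.toList = pvLinesOf (content.toList.flatMap pvEscChar) := by
    have hm := PySem.Str.split?_map (pyHtmlEscape content) "\n"
    rw [hL, hnl] at hm
    simp only [PySem.Chars.split?, List.isEmpty_cons, if_false, Option.map_some,
      Bool.false_eq_true, Option.some_inj] at hm
    rw [hm, splitOn_newline, escape_toList]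
  have hA : (format_log_content_py content).toList =
      "<pre style=\"margin: 0; font-family: Consolas, monospace;\">".toList ++
        PySem.Chars.join ['\n'] ((pvLinesOf (content.toList.flatMap pvEscChar)).map (fun l => (pvFlush l).toList)) ++
        "</pre>".toList := by
    simp only [format_log_content_py, hL, Option.getD_some,
      PySem.List.foldl_append_singleton_eq_map, List.nil_append, String.toList_append]
    simp only [PySem.Str.join, String.toList_ofList, hnl]
    rw [List.map_map]
    have : (String.toList ∘ pvFmtLineA) = ((fun l => (pvFlush l).toList) ∘ String.toList) := by
      funext p
      simp [fmt_eq p]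
    rw [this, ← List.map_map, hmap, List.append_assoc]
  have hB : (format_log_content_py_alt content).toList =
      "<pre style=\"margin: 0; font-family: Consolas, monospace;\">".toList ++
        PySem.Chars.join ['\n'] ((pvLinesOf (content.toList.flatMap pvEscChar)).map (fun l => (pvFlush l).toList)) ++
        "</pre>".toList := by
    simp only [format_log_content_py_alt, String.toList_append]
    rw [bgo_toList content.toList []]
    have hid : (pvLinesOf (content.toList.flatMap pvEscChar)).modifyHead (fun x => [] ++ x) =
        pvLinesOf (content.toList.flatMap pvEscChar) := by
      cases pvLinesOf (content.toList.flatMap pvEscChar) with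
      | nil => rfl
      | cons y ys => simp [List.modifyHead]
    rw [hid, List.append_assoc]
  rw [hA, hB]
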